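-- pv_equiv track=rewrite | github.com/TaeHyoungKwon/Codewars | 2021/python/code_wars_6kyu/210327_how_much.py | howmuch
-- ===== SOURCE A (Python) =====
-- from typing import List
--
-- CAR_PRICE = 7
--
-- BOAT_PRICE = 9
--
-- def howmuch(m: int, n: int) -> List[List[str]]:
--     def f():
--         for x in range(min(m, n), max(m, n) + 1):
--             b, r1 = divmod(x - 2, CAR_PRICE)
--             c, r2 = divmod(x - 1, BOAT_PRICE)
--             if r1 == r2 == 0:
--                 yield [f"M: {x}", f"B: {b}", f"C: {c}"]
--
--     return list(f())
-- ===== SOURCE B (Python) =====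
-- def howmuch(m, n):
--     # CRT: x-2 % 7 == 0 and x-1 % 9 == 0  <=>  x % 63 == 37; step by 63 from the
--     # first such x >= min(m, n).
--     lo, hi = (m, n) if m <= n else (n, m)
--     start = lo + (37 - lo) % 63
--     return [[f"M: {x}", f"B: {(x - 2) // 7}", f"C: {(x - 1) // 9}"]
--             for x in range(start, hi + 1, 63)]
-- ===== Notes on version B (the rewrite author's own statement) =====
-- stated objective: faster
-- what changed: B replaces A's scan of every integer in [min(m,n), max(m,n)] (testing both remainders at each x) with the CRT closed form: the conditions mean x % 63 == 37, so B computes the first solution >= min(m,n) arithmetically and steps by 63, visiting only the solutions.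
import Mathlib
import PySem

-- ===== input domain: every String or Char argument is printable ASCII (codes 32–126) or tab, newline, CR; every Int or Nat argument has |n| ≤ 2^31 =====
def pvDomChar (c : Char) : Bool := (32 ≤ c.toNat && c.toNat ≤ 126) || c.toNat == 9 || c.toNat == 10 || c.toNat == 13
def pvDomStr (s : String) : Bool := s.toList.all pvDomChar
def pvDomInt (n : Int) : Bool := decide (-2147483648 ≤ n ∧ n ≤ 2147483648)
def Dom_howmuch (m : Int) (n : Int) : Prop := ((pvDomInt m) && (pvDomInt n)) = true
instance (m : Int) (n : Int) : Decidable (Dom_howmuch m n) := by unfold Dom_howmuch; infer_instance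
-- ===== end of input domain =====

-- B replaces A's scan of every x in [min,max] by CRT: the two divisibilities mean
-- x ≡ 37 (mod 63), so B steps by 63 from the first solution ≥ min(m,n) (asymptotically faster).

-- ===== PORT A =====
-- row built at a yield: [f"M: {x}", f"B: {b}", f"C: {c}"]
def rowA (x b c : Int) : List String :=
  ["M: " ++ PySem.Int.toStr x, "B: " ++ PySem.Int.toStr b, "C: " ++ PySem.Int.toStr c]

def howmuch (m : Int) (n : Int) : List (List String) :=
  (PySem.List.pyRange (min m n) (max m n + 1) 1).foldl
    (fun acc x =>
      let b := PySem.Int.floordiv (x - 2) 7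
      let r1 := PySem.Int.mod (x - 2) 7
      let c := PySem.Int.floordiv (x - 1) 9
      let r2 := PySem.Int.mod (x - 1) 9
      if r1 == r2 && r2 == 0 then acc ++ [rowA x b c] else acc)
    []

-- ===== PORT B =====
def rowB (x : Int) : List String :=
  ["M: " ++ PySem.Int.toStr x,
   "B: " ++ PySem.Int.toStr (PySem.Int.floordiv (x - 2) 7),
   "C: " ++ PySem.Int.toStr (PySem.Int.floordiv (x - 1) 9)]

def howmuch_alt (m : Int) (n : Int) : List (List String) :=
  let lo := if m ≤ n then m else n
  let hi := if m ≤ n then n else m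
  let start := lo + PySem.Int.mod (37 - lo) 63
  (PySem.List.pyRange start (hi + 1) 63).map rowB

-- ===== PRECONDITION & SPEC =====
def Spec_howmuch (m : Int) (n : Int) (out : List (List String)) : Prop := out = howmuch_alt m n
instance (m : Int) (n : Int) (out : List (List String)) : Decidable (Spec_howmuch m n out) := by unfold Spec_howmuch; infer_instance

-- ===== CLAIM (what is proved, stated in full; the proofs are below) =====
def Claim_equal_howmuch : Prop := ∀ (m : Int) (n : Int), Dom_howmuch m n → Spec_howmuch m n (howmuch m n)

-- ===== LEMMAS AND PROOFS =====

-- A's yield condition, as a Bool predicate on x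
def pCond (x : Int) : Bool :=
  PySem.Int.mod (x - 2) 7 == PySem.Int.mod (x - 1) 9 && PySem.Int.mod (x - 1) 9 == 0

lemma rowA_eq_rowB (x : Int) :
    rowA x (PySem.Int.floordiv (x - 2) 7) (PySem.Int.floordiv (x - 1) 9) = rowB x := rfl

-- the key list identity: filtering the step-1 range by the two divisibilities
-- IS the step-63 range starting at the first solution ≥ lo
lemma filter_eq_range63 (lo hi : Int) :
    (PySem.List.pyRange lo (hi + 1) 1).filter pCond =
      PySem.List.pyRange (lo + PySem.Int.mod (37 - lo) 63) (hi + 1) 63 := by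
  have h63 : (0:Int) < 63 := by norm_num
  have hm := PySem.Int.mod_eq_emod_of_pos (a := 37 - lo) h63
  -- both sides are strictly increasing and have the same members
  have hp1 : ((PySem.List.pyRange lo (hi + 1) 1).filter pCond).Pairwise (· < ·) :=
    (PySem.List.pairwise_lt_pyRange_one lo (hi + 1)).filter pCond
  have hp2 : (PySem.List.pyRange (lo + PySem.Int.mod (37 - lo) 63) (hi + 1) 63).Pairwise
      (· < ·) := by
    rw [PySem.List.pyRange_of_pos _ _ h63]
    exact (List.pairwise_lt_range).map _ (by intro a b h; omega)
  have hperm : ((PySem.List.pyRange lo (hi + 1) 1).filter pCond).Perm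
      (PySem.List.pyRange (lo + PySem.Int.mod (37 - lo) 63) (hi + 1) 63) := by
    rw [List.perm_ext_iff_of_nodup
      ((PySem.List.nodup_pyRange_one lo (hi + 1)).filter pCond) (hp2.imp ne_of_lt)]
    intro x
    simp only [List.mem_filter, PySem.List.mem_pyRange_one,
      PySem.List.mem_pyRange_iff_of_pos h63, pCond, Bool.and_eq_true, beq_iff_eq,
      PySem.Int.mod_eq_emod_of_pos (by norm_num : (0:Int) < 7),
      PySem.Int.mod_eq_emod_of_pos (by norm_num : (0:Int) < 9), hm]
    omega
  exact hperm.eq_of_pairwise (fun a b _ _ h1 h2 => by omega) hp1 hp2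

-- ===== VERDICT (by name: the statement is the Claim_ definition above) =====
theorem howmuch_spec : Claim_equal_howmuch := by
  intro m n _
  unfold Spec_howmuch howmuch howmuch_alt
  have hminmax : min m n = (if m ≤ n then m else n) ∧ max m n = (if m ≤ n then n else m) := by
    constructor <;> split <;> omega
  rw [hminmax.1, hminmax.2]
  set lo := if m ≤ n then m else n
  set hi := if m ≤ n then n else m
  have : (fun (acc : List (List String)) (x : Int) =>
      let b := PySem.Int.floordiv (x - 2) 7
      let r1 := PySem.Int.mod (x - 2) 7
      let c := PySem.Int.floordiv (x - 1) 9
      let r2 := PySem.Int.mod (x - 1) 9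
      if r1 == r2 && r2 == 0 then acc ++ [rowA x b c] else acc) =
      (fun acc x => if pCond x then acc ++ [rowB x] else acc) := by
    funext acc x
    simp only [pCond, rowA_eq_rowB]
    rfl
  rw [this, PySem.List.foldl_append_if pCond rowB, List.nil_append, filter_eq_range63]
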